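-- pv_equiv track=rewrite | github.com/emy3210/eps-mac110 | ep12.py | gera_gaps
-- ===== SOURCE A (Python) =====
-- GAP = '_'
--
-- def gera_gaps( dna ):
--     ''' ( str ) -> list
--     RECEBE uma string `dna` representando uma fita de DNA com os
--     símbolos 'A', 'T', 'C', 'G' e '_' (um gap).
--     RETORNA uma lista com todas as variações de dna com um gap a
--     mais e sem repetição.
--
--     exemplos:
--     In  [1]: gera_gaps( 'T' )
--     Out [1]: ['_T', 'T_']
--
--     In  [2]: gera_gaps( 'CA' )
--     Out [2]: ['_CA', 'C_A', 'CA_']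
--
--     In  [3]: gera_gaps( 'AT_G')
--     Out [3]: ['_AT_G', 'A_T_G', 'AT__G', 'AT_G_']
--     '''
--     # modifique o código abaixo para conter a sua solução.
--     lista=[]
--     y=conte_permut(dna)
--     n=0
--     i=0
--     while n<y:
--         inicio=dna[0:i]
--         meio=GAP
--         fim=dna[i:]
--         novo_dna=inicio+meio+fim
--         if not novo_dna in lista:
--             lista+=[novo_dna]
--             n+=1
--             i+=1
--         else:
--             i+=1
--     return lista
--
-- def conte_permut(dna):
--     '''(str) -> int
--     RECEBE uma fita de dna e calcula o número de permutações possíveis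
--     ao adicionar um gap a esta fita'''
--
--     x=len(dna)
--     g=0
--     for i in range(x):
--         if GAP == dna[i]:
--             g+=1
--     calc=x+1-g
--     return calc
-- ===== SOURCE B (Python) =====
-- GAP = '_'
--
-- def gera_gaps(dna):
--     # single pass: position i duplicates an earlier variant exactly when it
--     # follows an existing gap, so skip i>0 with dna[i-1] == GAP
--     return [dna[:i] + GAP + dna[i:]
--             for i in range(len(dna) + 1)
--             if i == 0 or dna[i - 1] != GAP]
-- ===== Notes on version B (the rewrite author's own statement) =====
-- stated objective: faster
-- what changed: Replaces the counter helper, the while loop and the membership-based dedup list with one comprehension over insertion positions that skips a position exactly when it directly follows an existing gap.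
import Mathlib
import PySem

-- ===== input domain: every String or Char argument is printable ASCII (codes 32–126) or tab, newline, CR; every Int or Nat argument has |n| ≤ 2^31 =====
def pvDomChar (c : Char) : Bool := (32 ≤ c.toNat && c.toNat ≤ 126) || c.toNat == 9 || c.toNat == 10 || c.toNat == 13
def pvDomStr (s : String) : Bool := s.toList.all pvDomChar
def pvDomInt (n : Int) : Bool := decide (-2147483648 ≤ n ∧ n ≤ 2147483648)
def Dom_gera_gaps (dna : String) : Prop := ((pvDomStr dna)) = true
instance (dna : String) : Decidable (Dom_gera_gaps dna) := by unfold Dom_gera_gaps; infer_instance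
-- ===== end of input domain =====

-- B replaces A's counter helper + while loop + membership dedup list by one pass over
-- insertion positions, skipping a position exactly when it follows an existing gap (simpler).

-- ===== PORT A =====
-- the while loop of A: state (lista, n, i); fuel only makes the same computation total
-- (the loop always stops by i = len(dna), proved below, so fuel len+1 is never exhausted)
def gera_gaps_loop (l : List Char) (y : ℕ) : List (List Char) → ℕ → ℕ → ℕ → List (List Char)
  | lista, _, _, 0 => lista
  | lista, n, i, fuel+1 =>
    if n < y then
      let novo := l.take i ++ '_' :: l.drop i
      if novo ∈ lista then gera_gaps_loop l y lista n (i+1) fuel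
      else gera_gaps_loop l y (lista ++ [novo]) (n+1) (i+1) fuel
    else lista

-- helper conte_permut of A
def conte_permut_port (l : List Char) : ℕ :=
  let x := l.length
  let g := (List.range x).foldl (fun g i => if some '_' = l[i]? then g + 1 else g) 0
  x + 1 - g

def gera_gaps (dna : String) : List String :=
  let l := dna.toList
  (gera_gaps_loop l (conte_permut_port l) [] 0 0 (l.length + 1)).map String.mk

-- ===== PORT B =====
-- B's guard: keep position i iff i == 0 or dna[i-1] != '_'
def pvKeep (l : List Char) (i : ℕ) : Bool := i == 0 || (l[i-1]? != some '_')

def gera_gaps_alt (dna : String) : List String :=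
  let l := dna.toList
  ((List.range (l.length + 1)).filter (pvKeep l)).map
    (fun i => String.mk (l.take i ++ '_' :: l.drop i))

-- ===== PRECONDITION & SPEC =====
def Spec_gera_gaps (dna : String) (out : List String) : Prop := out = gera_gaps_alt dna
instance (dna : String) (out : List String) : Decidable (Spec_gera_gaps dna out) := by unfold Spec_gera_gaps; infer_instance

-- ===== CLAIM (what is proved, stated in full; the proofs are below) =====
def Claim_equal_gera_gaps : Prop := ∀ (dna : String), Dom_gera_gaps dna → Spec_gera_gaps dna (gera_gaps dna)

-- ===== LEMMAS AND PROOFS =====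

-- the string with a gap inserted at position i
def insAt (l : List Char) (i : ℕ) : List Char := l.take i ++ '_' :: l.drop i

-- the kept positions below i, mapped to their variants
def pvK (l : List Char) (i : ℕ) : List (List Char) :=
  ((List.range i).filter (pvKeep l)).map (insAt l)

lemma countP_range_getElem (l : List Char) :
    (List.range l.length).countP (fun i => decide (some '_' = l[i]?)) = l.count '_' := by
  induction l using List.reverseRecOn with
  | nil => simp
  | append_singleton l c ih =>
    simp only [List.length_append, List.length_singleton, List.range_succ,
      List.countP_append]
    rw [List.countP_congr (q := fun i => decide (some '_' = l[i]?))
        (by intro i hi; simp only [List.mem_range] at hi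
            simp [List.getElem?_append_left hi])]
    have hc : (l ++ [c])[l.length]? = some c := by simp
    rcases eq_or_ne c '_' with h | h
    · simp [ih, List.count_append, h, List.countP_cons, hc]
    · simp [ih, List.count_append, List.countP_cons, hc, h, Ne.symm h]

lemma foldl_count (l : List Char) : ∀ (xs : List ℕ) (a : ℕ),
    xs.foldl (fun g i => if some '_' = l[i]? then g + 1 else g) a
      = a + xs.countP (fun i => decide (some '_' = l[i]?)) := by
  intro xs
  induction xs with
  | nil => simp
  | cons x xs ih =>
    intro a
    rw [List.foldl_cons, List.countP_cons]
    by_cases h : some '_' = l[x]?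
    · rw [if_pos h, ih]
      simp [h]
      omega
    · rw [if_neg h, ih]
      simp [h]

lemma conte_permut_eq (l : List Char) :
    conte_permut_port l = l.length + 1 - l.count '_' := by
  simp [conte_permut_port, foldl_count, countP_range_getElem]

lemma kept_count (l : List Char) :
    ((List.range (l.length + 1)).filter (pvKeep l)).length = l.length + 1 - l.count '_' := by
  induction l using List.reverseRecOn with
  | nil => simp [pvKeep]
  | append_singleton l c ih =>
    have hc : l.count '_' ≤ l.length := List.count_le_length
    have hl : (l ++ [c])[l.length]? = some c := by simp
    have hrs : List.range ((l ++ [c]).length + 1)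
        = List.range (l.length + 1) ++ [l.length + 1] := by
      simp [List.range_succ]
    rw [hrs, List.filter_append, List.length_append]
    rw [List.filter_congr (q := pvKeep l)
        (by intro i hi; simp only [List.mem_range] at hi
            unfold pvKeep
            rcases Nat.eq_zero_or_pos i with h0 | h0
            · simp [h0]
            · have : i - 1 < l.length := by omega
              simp [List.getElem?_append_left this])]
    rw [ih]
    rcases eq_or_ne c '_' with h | h
    · subst h
      have hk : pvKeep (l ++ ['_']) (l.length + 1) = false := by
        simp [pvKeep, hl]
      simp [List.filter_cons, hk, List.count_append]
    · have hk : pvKeep (l ++ [c]) (l.length + 1) = true := by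
        simp [pvKeep, hl, h]
      simp [List.filter_cons, hk, List.count_append, h, Ne.symm h]
      omega

-- if inserting at i (with i ≤ len) reproduces an earlier insertion, the previous char is a gap
lemma insAt_eq_gap (l : List Char) (i j : ℕ) (hji : j < i) (hi : i ≤ l.length)
    (h : insAt l i = insAt l j) : l[i-1]? = some '_' := by
  have htake : (l.take i).length = i := by simp [hi]
  have htj : (l.take j).length = j := by simp; omega
  have hgi : (insAt l i)[i]? = some '_' := by
    unfold insAt
    rw [List.getElem?_append_right (by omega)]
    simp [htake]
  have hgj : (insAt l j)[i]? = l[i-1]? := by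
    unfold insAt
    rw [List.getElem?_append_right (by omega)]
    have : i - (l.take j).length = (i - j - 1) + 1 := by omega
    rw [this]
    simp [List.getElem?_drop]
    congr 1
    omega
  rw [h, hgj] at hgi
  exact hgi

-- inserting right after a gap reproduces the insertion one step earlier
lemma insAt_succ_gap (l : List Char) (k : ℕ) (h : l[k]? = some '_') :
    insAt l (k+1) = insAt l k := by
  have hk : k < l.length := by
    by_contra hk
    have hnone : l[k]? = none := List.getElem?_eq_none (by omega)
    rw [hnone] at h
    cases h
  have hg : l[k] = '_' := by
    have h2 := h
    rw [List.getElem?_eq_getElem hk] at h2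
    exact Option.some.inj h2
  unfold insAt
  rw [List.take_succ, List.drop_eq_getElem_cons hk]
  simp [List.getElem?_eq_getElem hk, hg]

-- every earlier insertion value is already in the dedup list
lemma insAt_mem_pvK (l : List Char) (i : ℕ) : ∀ j, j < i → insAt l j ∈ pvK l i := by
  intro j
  induction j using Nat.strong_induction_on with
  | _ j ih =>
    intro hj
    by_cases hk : pvKeep l j = true
    · exact List.mem_map_of_mem (List.mem_filter.mpr ⟨List.mem_range.mpr hj, hk⟩)
    · have hj0 : j ≠ 0 := by
        intro h0; simp [pvKeep, h0] at hk
      have hgap : l[j-1]? = some '_' := by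
        simp [pvKeep, hj0] at hk; exact hk
      have : insAt l j = insAt l (j-1) := by
        have h2 := insAt_succ_gap l (j-1) hgap
        have h3 : j - 1 + 1 = j := by omega
        rwa [h3] at h2
      rw [this]
      exact ih (j-1) (by omega) (by omega)

lemma mem_pvK_iff (l : List Char) (i : ℕ) (hi : i ≤ l.length) :
    insAt l i ∈ pvK l i ↔ pvKeep l i = false := by
  constructor
  · intro hmem
    rcases List.mem_map.mp hmem with ⟨j, hj, hins⟩
    rcases List.mem_filter.mp hj with ⟨hjr, _⟩
    have hji : j < i := List.mem_range.mp hjr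
    have hgap := insAt_eq_gap l i j hji hi hins.symm
    have hi0 : i ≠ 0 := by omega
    simp [pvKeep, hi0, hgap]
  · intro hk
    have hi0 : i ≠ 0 := by
      intro h0; simp [pvKeep, h0] at hk
    have hgap : l[i-1]? = some '_' := by
      simp [pvKeep, hi0] at hk; exact hk
    have heq : insAt l i = insAt l (i-1) := by
      have h2 := insAt_succ_gap l (i-1) hgap
      have h3 : i - 1 + 1 = i := by omega
      rwa [h3] at h2
    rw [heq]
    exact insAt_mem_pvK l i (i-1) (by omega)

lemma pvK_succ (l : List Char) (i : ℕ) :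
    pvK l (i+1) = pvK l i ++ (if pvKeep l i then [insAt l i] else []) := by
  unfold pvK
  rw [List.range_succ, List.filter_append, List.map_append]
  by_cases h : pvKeep l i <;> simp [h]

lemma pvK_full_of_length_eq (l : List Char) (i : ℕ) (hi : i ≤ l.length + 1)
    (hn : (pvK l i).length = ((List.range (l.length+1)).filter (pvKeep l)).length) :
    pvK l i = pvK l (l.length + 1) := by
  have hsplit : List.range (l.length + 1) = List.range i ++ (List.range (l.length + 1 - i)).map (i + ·) := by
    have h5 := @List.range_add i (l.length + 1 - i)
    rw [show i + (l.length + 1 - i) = l.length + 1 from by omega] at h5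
    exact h5
  unfold pvK
  rw [hsplit, List.filter_append]
  have hlen : (((List.range (l.length + 1 - i)).map (i + ·)).filter (pvKeep l)).length = 0 := by
    unfold pvK at hn
    rw [hsplit, List.filter_append, List.length_append] at hn
    simp only [List.length_map] at hn ⊢
    omega
  rw [List.length_eq_zero_iff] at hlen
  rw [hlen]
  simp

lemma loop_inv (l : List Char) : ∀ (fuel i : ℕ), i + fuel = l.length + 1 →
    gera_gaps_loop l (l.length + 1 - l.count '_') (pvK l i) ((pvK l i).length) i fuel
      = pvK l (l.length + 1) := by
  intro fuel
  induction fuel with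
  | zero =>
    intro i hif
    have : i = l.length + 1 := by omega
    subst this
    rfl
  | succ fuel ih =>
    intro i hif
    have hi : i ≤ l.length := by omega
    rw [gera_gaps_loop]
    by_cases hn : (pvK l i).length < l.length + 1 - l.count '_'
    · rw [if_pos hn]
      show (if insAt l i ∈ pvK l i then _ else _) = _
      by_cases hk : pvKeep l i = true
      · rw [if_neg (by rw [mem_pvK_iff l i hi]; simp [hk])]
        have hK : pvK l i ++ [insAt l i] = pvK l (i+1) := by
          rw [pvK_succ, hk]; simp
        have hlen : (pvK l i).length + 1 = (pvK l (i+1)).length := by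
          rw [← hK]; simp
        show gera_gaps_loop l (l.length + 1 - l.count '_') (pvK l i ++ [insAt l i])
            ((pvK l i).length + 1) (i+1) fuel = pvK l (l.length + 1)
        rw [hK, hlen]
        exact ih (i+1) (by omega)
      · rw [if_pos ((mem_pvK_iff l i hi).mpr (by simpa using hk))]
        have hK : pvK l i = pvK l (i+1) := by
          rw [pvK_succ]; simp [hk]
        rw [hK]
        exact ih (i+1) (by omega)
    · rw [if_neg hn]
      apply pvK_full_of_length_eq l i (by omega)
      have hle : (pvK l i).length ≤ ((List.range (l.length+1)).filter (pvKeep l)).length := by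
        unfold pvK
        rw [List.length_map]
        have hsplit : List.range (l.length + 1)
            = List.range i ++ (List.range (l.length + 1 - i)).map (i + ·) := by
          have h5 := @List.range_add i (l.length + 1 - i)
          rw [show i + (l.length + 1 - i) = l.length + 1 from by omega] at h5
          exact h5
        rw [hsplit, List.filter_append, List.length_append]
        omega
      rw [kept_count] at hle
      rw [kept_count]
      omega

-- ===== VERDICT (by name: the statement is the Claim_ definition above) =====
theorem gera_gaps_spec : Claim_equal_gera_gaps := by
  intro dna _
  unfold Spec_gera_gaps gera_gaps gera_gaps_alt
  have h0 : pvK dna.toList 0 = [] := by simp [pvK]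
  have := loop_inv dna.toList (dna.toList.length + 1) 0 (by omega)
  rw [h0] at this
  simp only [List.length_nil] at this
  show (gera_gaps_loop dna.toList (conte_permut_port dna.toList) [] 0 0
      (dna.toList.length + 1)).map String.mk
    = ((List.range (dna.toList.length + 1)).filter (pvKeep dna.toList)).map
        (fun i => String.mk (dna.toList.take i ++ '_' :: dna.toList.drop i))
  rw [conte_permut_eq, this]
  unfold pvK
  rw [List.map_map]
  rfl
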